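-- pv_equiv track=rewrite | github.com/LastChanceKatze/ml_young_people_survey | scripts/meanshift.py | ms_detect_outliers
-- ===== SOURCE A (Python) =====
-- def ms_detect_outliers(labels, labels_unique, labels_count, min_points):
--     outlier_labels = []
--     for label, label_count in zip(labels_unique, labels_count):
--         if label_count < min_points:
--             outlier_labels.append(label)
--
--     outlier_inx = []
--     for i in range(len(labels)):
--         if labels[i] in outlier_labels:
--             outlier_inx.append(i)
--
--     return outlier_inx
-- ===== SOURCE B (Python) =====
-- def ms_detect_outliers(labels, labels_unique, labels_count, min_points):
--     # Inverted index: one pass groups the indices of each label into a bucket;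
--     # the pass over (label, count) pairs pops whole buckets of small clusters
--     # (pop makes a duplicated unique-label contribute its bucket only once);
--     # finally the gathered indices are sorted back into ascending order.
--     positions = {}
--     for i, lbl in enumerate(labels):
--         positions.setdefault(lbl, []).append(i)
--     gathered = []
--     for lbl, cnt in zip(labels_unique, labels_count):
--         if cnt < min_points:
--             gathered.extend(positions.pop(lbl, []))
--     return sorted(gathered)
-- ===== Notes on version B (the rewrite author's own statement) =====
-- stated objective: faster
-- what changed: Replaces A's outlier-label list plus per-index membership scan by an inverted index (label -> list of its indices) built in one pass; small-cluster buckets are then popped whole while walking zip(labels_unique, labels_count) and the gathered indices are sorted back into ascending order.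
import Mathlib
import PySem

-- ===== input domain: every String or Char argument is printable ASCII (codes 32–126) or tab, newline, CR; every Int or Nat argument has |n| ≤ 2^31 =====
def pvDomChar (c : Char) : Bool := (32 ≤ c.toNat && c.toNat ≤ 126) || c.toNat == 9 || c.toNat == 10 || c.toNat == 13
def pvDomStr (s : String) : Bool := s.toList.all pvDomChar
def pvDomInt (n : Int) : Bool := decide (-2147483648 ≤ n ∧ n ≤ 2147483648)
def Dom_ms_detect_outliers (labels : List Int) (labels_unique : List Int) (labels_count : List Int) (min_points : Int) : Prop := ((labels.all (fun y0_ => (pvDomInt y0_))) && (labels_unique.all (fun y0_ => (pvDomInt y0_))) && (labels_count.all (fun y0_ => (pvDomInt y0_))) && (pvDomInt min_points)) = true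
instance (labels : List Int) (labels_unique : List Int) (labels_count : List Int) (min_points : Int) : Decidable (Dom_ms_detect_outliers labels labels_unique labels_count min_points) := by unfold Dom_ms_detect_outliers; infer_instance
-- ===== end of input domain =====

-- B replaces A's outlier-label list and per-index membership scan by an inverted
-- index (label -> bucket of its indices); small buckets are popped whole and the
-- gathered indices sorted back into ascending order (measured faster).

-- ===== PORT A =====
def ms_detect_outliers (labels : List Int) (labels_unique : List Int) (labels_count : List Int) (min_points : Int) : List Int :=
  let outlier_labels : List Int :=
    (labels_unique.zip labels_count).foldl
      (fun acc p => if decide (p.2 < min_points) then acc ++ [p.1] else acc) []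
  (PySem.List.pyRange 0 (labels.length : Int) 1).foldl
    (fun acc i => if outlier_labels.contains (PySem.List.pyGetD labels i 0) then acc ++ [i] else acc) []

-- ===== PORT B =====
def ms_detect_outliers_alt (labels : List Int) (labels_unique : List Int) (labels_count : List Int) (min_points : Int) : List Int :=
  -- positions.setdefault(lbl, []).append(i)  =  d[lbl] = d.get(lbl, []) + [i]  =  Dict.modify
  let positions : PySem.Dict Int (List Int) :=
    (PySem.List.enumerate labels 0).foldl
      (fun d p => d.modify p.2 [] (fun b => b ++ [p.1])) PySem.Dict.empty
  -- out.extend(positions.pop(lbl, []))  =  getD lbl [] then erase lbl (exact for pop with default)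
  let r :=
    (labels_unique.zip labels_count).foldl
      (fun s p => if decide (p.2 < min_points) then (s.1 ++ s.2.getD p.1 [], s.2.erase p.1) else s)
      (([] : List Int), positions)
  PySem.List.sorted r.1 (fun x => x) false

-- ===== PRECONDITION & SPEC =====
def Spec_ms_detect_outliers (labels : List Int) (labels_unique : List Int) (labels_count : List Int) (min_points : Int) (out : List Int) : Prop := out = ms_detect_outliers_alt labels labels_unique labels_count min_points
instance (labels : List Int) (labels_unique : List Int) (labels_count : List Int) (min_points : Int) (out : List Int) : Decidable (Spec_ms_detect_outliers labels labels_unique labels_count min_points out) := by unfold Spec_ms_detect_outliers; infer_instance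

-- ===== CLAIM (what is proved, stated in full; the proofs are below) =====
def Claim_equal_ms_detect_outliers : Prop := ∀ (labels : List Int) (labels_unique : List Int) (labels_count : List Int) (min_points : Int), Dom_ms_detect_outliers labels labels_unique labels_count min_points → Spec_ms_detect_outliers labels labels_unique labels_count min_points (ms_detect_outliers labels labels_unique labels_count min_points)

-- ===== LEMMAS AND PROOFS =====

-- A's outlier-label list contains v iff some (label, count) pair with label v has a small count.
lemma contains_small (m v : Int) (ps : List (Int × Int)) :
    ((ps.filter (fun p => decide (p.2 < m))).map (fun p => p.1)).contains v
      = ps.any (fun p => p.1 == v && decide (p.2 < m)) := by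
  rw [Bool.eq_iff_iff]
  simp only [List.contains_iff_mem, List.mem_map, List.mem_filter, List.any_eq_true,
    Bool.and_eq_true, beq_iff_eq, decide_eq_true_eq]
  constructor
  · rintro ⟨p, ⟨hp, hlt⟩, hv⟩; exact ⟨p, hp, hv, hlt⟩
  · rintro ⟨p, hp, hv, hlt⟩; exact ⟨p, ⟨hp, hlt⟩, hv⟩

-- Splitting a filter along two mutually exclusive predicates, up to permutation.
lemma filter_or_perm {α : Type} (a b : α → Bool) (E : List α)
    (h : ∀ e, a e = true → b e = false) :
    (E.filter (fun e => a e || b e)).Perm (E.filter a ++ E.filter b) := by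
  induction E with
  | nil => simp
  | cons e E ih =>
    by_cases ha : a e = true
    · simpa [List.filter_cons, ha, h e ha] using ih.cons e
    · by_cases hb : b e = true
      · simp only [List.filter_cons, ha, hb, Bool.false_or, if_true]
        exact (ih.cons e).trans List.perm_middle.symm
      · simpa [List.filter_cons, ha, hb] using ih

-- The concatenation of the items with key k of a key-nodup dict is its bucket.
lemma bucket_flat (d : PySem.Dict Int (List Int)) (k : Int) (hnd : d.keys.Nodup) :
    ((d.items.filter (fun q => q.1 == k)).flatMap (fun q => q.2)) = d.getD k [] := by
  rw [PySem.Dict.items_eq_map_keys d hnd []]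
  rw [List.filter_map]
  by_cases hk : k ∈ d.keys
  · have : d.keys.filter ((fun q => q.1 == k) ∘ (fun k' => (k', d.getD k' []))) = [k] := by
      have : ∀ K : List Int, K.Nodup → k ∈ K →
          K.filter ((fun q => q.1 == k) ∘ (fun k' => (k', d.getD k' []))) = [k] := by
        intro K
        induction K with
        | nil => intro _ h; cases h
        | cons x K ih =>
          intro hnd hm
          rcases List.mem_cons.mp hm with h | h
          · subst h
            have : K.filter ((fun q => q.1 == k) ∘ (fun k' => (k', d.getD k' []))) = [] := by
              apply List.filter_eq_nil_iff.mpr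
              intro y hy
              have : y ≠ k := fun hyk => (List.nodup_cons.mp hnd).1 (hyk ▸ hy)
              simp [this]
            simp [this]
          · have hx : x ≠ k := fun hxk => (List.nodup_cons.mp hnd).1 (hxk ▸ h)
            simp only [List.filter_cons, Function.comp]
            simp only [beq_iff_eq]
            rw [if_neg (by simpa using hx)]
            exact ih (List.nodup_cons.mp hnd).2 h
      exact this d.keys hnd hk
    simp [this]
  · have hc : d.contains k = false := by
      by_contra hcc
      exact hk ((PySem.Dict.contains_iff_mem_keys d k).mp (by simpa using hcc))
    have : d.keys.filter ((fun q => q.1 == k) ∘ (fun k' => (k', d.getD k' []))) = [] := by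
      apply List.filter_eq_nil_iff.mpr
      intro y hy
      have : y ≠ k := fun hyk => hk (hyk ▸ hy)
      simp [this]
    simp [this, PySem.Dict.getD_of_not_contains d [] hc]

-- Erasing a key filters the items list (definitional).
lemma erase_items (d : PySem.Dict Int (List Int)) (k : Int) :
    (d.erase k).items = d.items.filter (fun p => !(p.1 == k)) := rfl

lemma keys_erase_nodup (d : PySem.Dict Int (List Int)) (k : Int) (h : d.keys.Nodup) :
    (d.erase k).keys.Nodup := by
  have hs : (d.erase k).items.Sublist d.items := by
    rw [erase_items]; exact List.filter_sublist
  simp only [PySem.Dict.keys] at h ⊢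
  exact List.Nodup.sublist (hs.map (fun p => p.1)) h

-- The popping loop gathers, up to permutation, exactly the buckets of the small labels.
lemma popLoop_perm (m : Int) (ps : List (Int × Int)) : ∀ (out : List Int) (d : PySem.Dict Int (List Int)), d.keys.Nodup →
    ((ps.foldl (fun s p => if decide (p.2 < m) then (s.1 ++ s.2.getD p.1 [], s.2.erase p.1) else s) (out, d)).1).Perm
      (out ++ (d.items.filter (fun kv => ps.any (fun p => p.1 == kv.1 && decide (p.2 < m)))).flatMap (fun q => q.2)) := by
  induction ps with
  | nil =>
    intro out d _
    simp
  | cons p ps ih =>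
    intro out d hnd
    by_cases hc : p.2 < m
    · simp only [List.foldl_cons, decide_eq_true hc, if_true]
      refine (ih (out ++ d.getD p.1 []) (d.erase p.1) (keys_erase_nodup d p.1 hnd)).trans ?_
      rw [erase_items, List.filter_filter]
      have hsplit : (d.items.filter (fun kv => (p :: ps).any (fun q => q.1 == kv.1 && decide (q.2 < m)))).Perm
          (d.items.filter (fun kv => kv.1 == p.1)
            ++ d.items.filter (fun kv => (ps.any (fun q => q.1 == kv.1 && decide (q.2 < m))) && !(kv.1 == p.1))) := by
        have hcongr : d.items.filter (fun kv => (p :: ps).any (fun q => q.1 == kv.1 && decide (q.2 < m)))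
            = d.items.filter (fun kv => (kv.1 == p.1) || ((ps.any (fun q => q.1 == kv.1 && decide (q.2 < m))) && !(kv.1 == p.1))) := by
          apply List.filter_congr
          intro kv _
          simp only [List.any_cons, decide_eq_true hc, Bool.and_true]
          by_cases h1 : kv.1 = p.1
          · simp [h1]
          · have ha : (kv.1 == p.1) = false := by simpa using h1
            have hb : (p.1 == kv.1) = false := by
              simp only [beq_eq_false_iff_ne, ne_eq]
              exact fun h => h1 h.symm
            simp [ha, hb]
        rw [hcongr]
        apply filter_or_perm
        intro kv hkv
        simp only [beq_iff_eq] at hkv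
        simp [hkv]
      rw [List.append_assoc]
      refine List.Perm.append_left out ?_
      have hflat := List.Perm.flatMap_right (fun q => q.2) hsplit
      rw [List.flatMap_append, bucket_flat d p.1 hnd] at hflat
      exact hflat.symm
    · simp only [List.foldl_cons, decide_eq_false hc]
      rw [if_neg (by simp)]
      refine (ih out d hnd).trans ?_
      apply List.Perm.append_left
      apply List.Perm.of_eq
      congr 1
      apply List.filter_congr
      intro kv _
      simp [decide_eq_false hc]

-- Gathering the per-label buckets of the labels selected by q is, up to permutation,
-- the one-pass filter by q of the label column — provided the key list is nodup and
-- covers every label occurring in E.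
lemma gather_perm (q : Int → Bool) : ∀ (K : List Int) (E : List (Int × Int)), K.Nodup → (∀ p ∈ E, p.2 ∈ K) →
    ((K.filter q).flatMap (fun u => E.filter (fun p => p.2 == u))).Perm
      (E.filter (fun p => q p.2)) := by
  intro K
  induction K with
  | nil =>
    intro E _ hcov
    have : E = [] := by
      cases E with
      | nil => rfl
      | cons e E => exact absurd (hcov e (List.mem_cons_self)) (List.not_mem_nil)
    simp [this]
  | cons u K ih =>
    intro E hnd hcov
    have hu : u ∉ K := (List.nodup_cons.mp hnd).1
    have hK : K.Nodup := (List.nodup_cons.mp hnd).2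
    have hcov' : ∀ p ∈ E.filter (fun p => !(p.2 == u)), p.2 ∈ K := by
      intro p hp
      have hpE := List.mem_of_mem_filter hp
      have hpne : (p.2 == u) = false := by
        have := List.of_mem_filter hp; simpa using this
      rcases List.mem_cons.mp (hcov p hpE) with h | h
      · exact absurd (by simpa using h) (by simpa using hpne)
      · exact h
    have hbuckets : (K.filter q).flatMap (fun v => E.filter (fun p => p.2 == v))
        = (K.filter q).flatMap (fun v => (E.filter (fun p => !(p.2 == u))).filter (fun p => p.2 == v)) := by
      apply List.flatMap_congr  -- may not exist; fallback below
      intro v hv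
      rw [List.filter_filter]
      apply List.filter_congr
      intro p _
      have hvK : v ∈ K := List.mem_of_mem_filter hv
      have hvu : v ≠ u := fun h => hu (h ▸ hvK)
      cases h2 : (p.2 == v)
      · simp
      · have : p.2 = v := by simpa using h2
        simp [this, hvu]
    by_cases hq : q u = true
    · simp only [List.filter_cons, hq, if_true, List.flatMap_cons]
      have hrhs : (E.filter (fun p => q p.2)).Perm
          (E.filter (fun p => p.2 == u) ++ E.filter (fun p => !(p.2 == u) && q p.2)) := by
        have hcongr : E.filter (fun p => q p.2)
            = E.filter (fun p => (p.2 == u) || (!(p.2 == u) && q p.2)) := by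
          apply List.filter_congr
          intro p _
          cases h1 : (p.2 == u)
          · simp
          · have : p.2 = u := by simpa using h1
            simp [this, hq]
        rw [hcongr]
        apply filter_or_perm
        intro p hp
        simp [hp]
      symm
      refine hrhs.trans ?_
      apply List.Perm.append_left
      rw [hbuckets]
      have : E.filter (fun p => !(p.2 == u) && q p.2)
          = (E.filter (fun p => !(p.2 == u))).filter (fun p => q p.2) := by
        rw [List.filter_filter]
        apply List.filter_congr
        intro p _
        cases h1 : (p.2 == u)
        · simp
        · simp
      rw [this]
      exact (ih (E.filter (fun p => !(p.2 == u))) hK hcov').symm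
    · simp only [List.filter_cons]
      rw [if_neg hq]
      have hrhs : E.filter (fun p => q p.2) = (E.filter (fun p => !(p.2 == u))).filter (fun p => q p.2) := by
        rw [List.filter_filter]
        apply List.filter_congr
        intro p _
        cases h1 : (p.2 == u)
        · simp
        · have : p.2 = u := by simpa using h1
          simp [this, hq]
      rw [hbuckets, hrhs]
      exact ih (E.filter (fun p => !(p.2 == u))) hK hcov'

-- ===== VERDICT (by name: the statement is the Claim_ definition above) =====
theorem ms_detect_outliers_spec : Claim_equal_ms_detect_outliers := by
  intro labels lu lc m _
  show _ = ms_detect_outliers_alt labels lu lc m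
  simp only [ms_detect_outliers, ms_detect_outliers_alt]
  rw [PySem.List.foldl_append_if, PySem.List.foldl_append_if]
  simp only [List.nil_append, List.map_id']
  set ps := lu.zip lc with hps
  set E := PySem.List.enumerate labels 0 with hE
  set positions := E.foldl (fun d p => d.modify p.2 [] (fun b => b ++ [p.1])) PySem.Dict.empty with hpos
  -- key facts about the inverted index
  have hkeys : positions.keys = PySem.Set.update PySem.Dict.empty.keys (E.map (fun p => p.2)) :=
    PySem.Dict.keys_foldl_modify_key E (fun p => p.2) [] (fun _ p => fun b => b ++ [p.1]) PySem.Dict.empty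
  have hnd : positions.keys.Nodup :=
    PySem.Dict.nodup_keys_foldl_modify_key E (fun p => p.2) [] (fun _ p => fun b => b ++ [p.1]) PySem.Dict.empty (by simp)
  have hcov : ∀ p ∈ E, p.2 ∈ positions.keys := by
    intro p hp
    rw [hkeys]
    exact (PySem.Set.mem_update _ _ _).mpr (Or.inr (List.mem_map_of_mem hp))
  have hbucket : ∀ u : Int, positions.getD u [] = (E.filter (fun p => p.2 == u)).map (fun p => p.1) := by
    intro u
    have hswap : positions = (E.map Prod.swap).foldl (fun d p => d.modify p.1 [] (fun b => b ++ [p.2])) PySem.Dict.empty := by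
      rw [List.foldl_map]; rfl
    rw [hswap, PySem.Dict.getD_foldl_modify_append, PySem.Dict.getD_empty, List.nil_append,
        List.filter_map, List.map_map]
    rfl
  -- the popping loop, up to permutation
  have hpop := popLoop_perm m ps [] positions hnd
  simp only [List.nil_append] at hpop
  have hitems := PySem.Dict.items_eq_map_keys positions hnd []
  -- A's output is strictly increasing
  have hA_pairwise : ((PySem.List.pyRange 0 (labels.length : Int) 1).filter
      (fun i => (((ps.filter (fun p => decide (p.2 < m))).map (fun p => p.1)).contains (PySem.List.pyGetD labels i 0)))).Pairwise (· < ·) :=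
    List.Pairwise.filter _ (PySem.List.pairwise_lt_pyRange_one 0 (labels.length : Int))
  -- A's output as the filtered index column of the enumerate pairs
  have h1 : ((E.filter (fun p => ps.any (fun q => q.1 == p.2 && decide (q.2 < m)))).map (fun p => p.1))
      = (PySem.List.pyRange 0 (labels.length : Int) 1).filter
        (fun i => ps.any (fun q => q.1 == PySem.List.pyGetD labels i 0 && decide (q.2 < m))) := by
    rw [hE, PySem.List.enumerate_eq_map_pyRange labels 0, List.filter_map, List.map_map]
    simp [Function.comp_def]
  have h2 : (PySem.List.pyRange 0 (labels.length : Int) 1).filter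
        (fun i => (((ps.filter (fun p => decide (p.2 < m))).map (fun p => p.1)).contains (PySem.List.pyGetD labels i 0)))
      = (PySem.List.pyRange 0 (labels.length : Int) 1).filter
        (fun i => ps.any (fun q => q.1 == PySem.List.pyGetD labels i 0 && decide (q.2 < m))) := by
    apply List.filter_congr
    intro i _
    rw [contains_small]
  have hA_eq : (PySem.List.pyRange 0 (labels.length : Int) 1).filter
      (fun i => (((ps.filter (fun p => decide (p.2 < m))).map (fun p => p.1)).contains (PySem.List.pyGetD labels i 0)))
      = ((E.filter (fun p => ps.any (fun q => q.1 == p.2 && decide (q.2 < m)))).map (fun p => p.1)) :=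
    h2.trans h1.symm
  -- B's gathered list is a permutation of A's output
  have hperm : (((ps.foldl (fun s p => if decide (p.2 < m) then (s.1 ++ s.2.getD p.1 [], s.2.erase p.1) else s)
      (([] : List Int), positions)).1)).Perm
      ((E.filter (fun p => ps.any (fun q => q.1 == p.2 && decide (q.2 < m)))).map (fun p => p.1)) := by
    refine hpop.trans ?_
    rw [hitems, List.filter_map, List.flatMap_map]
    have hbkts : ∀ u ∈ positions.keys.filter ((fun kv => ps.any (fun p => p.1 == kv.1 && decide (p.2 < m))) ∘ (fun k => (k, positions.getD k []))),
        (fun q => q.2) ((fun k => (k, positions.getD k [])) u) = (E.filter (fun p => p.2 == u)).map (fun p => p.1) := by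
      intro u _
      exact hbucket u
    rw [List.flatMap_congr hbkts]
    rw [← List.map_flatMap]
    refine List.Perm.map _ ?_
    have hfc : positions.keys.filter ((fun kv => ps.any (fun p => p.1 == kv.1 && decide (p.2 < m))) ∘ (fun k => (k, positions.getD k [])))
        = positions.keys.filter (fun u => ps.any (fun p => p.1 == u && decide (p.2 < m))) := by
      apply List.filter_congr
      intro u _
      rfl
    rw [hfc]
    exact gather_perm (fun u => ps.any (fun p => p.1 == u && decide (p.2 < m))) positions.keys E hnd hcov
  exact (PySem.List.sorted_eq_of_perm_of_pairwise_lt _ _ (fun x => x)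
    (hA_eq ▸ hperm.symm) (hA_eq ▸ hA_pairwise)).symm
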